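-- pv_equiv track=rewrite | github.com/Rsirp0c/agent-demo | chat-backend/utils.py | apply_deployment_filters
-- ===== SOURCE A (Python) =====
-- from typing import Dict, List, Optional
--
-- def apply_deployment_filters(deployments: List[Dict],
--                            model_filter: Optional[List[str]] = None,
--                            sku_filter: Optional[List[str]] = None,
--                            location_filter: Optional[List[str]] = None) -> List[Dict]:
--     """
--     Apply additional filters to deployment list.
--
--     Args:
--         deployments: List of deployment dictionaries
--         model_filter: Filter by model names
--         sku_filter: Filter by SKU names
--         location_filter: Filter by deployment locations
--     """
--     filtered_deployments = []
--
--     for deployment in deployments: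
--         if model_filter and deployment.get("model") not in model_filter:
--             continue
--         if sku_filter and deployment.get("sku") not in sku_filter:
--             continue
--         if location_filter and deployment.get("location") not in location_filter:
--             continue
--
--         filtered_deployments.append(deployment)
--
--     return filtered_deployments
-- ===== SOURCE B (Python) =====
-- from typing import Dict, List, Optional
--
-- def apply_deployment_filters(deployments: List[Dict],
--                            model_filter: Optional[List[str]] = None,
--                            sku_filter: Optional[List[str]] = None,
--                            location_filter: Optional[List[str]] = None) -> List[Dict]:
--     """Sequential filtering passes: one pass per active filter."""
--     result = list(deployments)
--     if model_filter:
--         result = [d for d in result if d.get("model") in model_filter]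
--     if sku_filter:
--         result = [d for d in result if d.get("sku") in sku_filter]
--     if location_filter:
--         result = [d for d in result if d.get("location") in location_filter]
--     return result
-- ===== Notes on version B (the rewrite author's own statement) =====
-- stated objective: simpler
-- what changed: Replaced the single loop with three per-deployment short-circuit continue checks by three independent sequential filtering passes, one per active filter, over a progressively smaller list.
import Mathlib
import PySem

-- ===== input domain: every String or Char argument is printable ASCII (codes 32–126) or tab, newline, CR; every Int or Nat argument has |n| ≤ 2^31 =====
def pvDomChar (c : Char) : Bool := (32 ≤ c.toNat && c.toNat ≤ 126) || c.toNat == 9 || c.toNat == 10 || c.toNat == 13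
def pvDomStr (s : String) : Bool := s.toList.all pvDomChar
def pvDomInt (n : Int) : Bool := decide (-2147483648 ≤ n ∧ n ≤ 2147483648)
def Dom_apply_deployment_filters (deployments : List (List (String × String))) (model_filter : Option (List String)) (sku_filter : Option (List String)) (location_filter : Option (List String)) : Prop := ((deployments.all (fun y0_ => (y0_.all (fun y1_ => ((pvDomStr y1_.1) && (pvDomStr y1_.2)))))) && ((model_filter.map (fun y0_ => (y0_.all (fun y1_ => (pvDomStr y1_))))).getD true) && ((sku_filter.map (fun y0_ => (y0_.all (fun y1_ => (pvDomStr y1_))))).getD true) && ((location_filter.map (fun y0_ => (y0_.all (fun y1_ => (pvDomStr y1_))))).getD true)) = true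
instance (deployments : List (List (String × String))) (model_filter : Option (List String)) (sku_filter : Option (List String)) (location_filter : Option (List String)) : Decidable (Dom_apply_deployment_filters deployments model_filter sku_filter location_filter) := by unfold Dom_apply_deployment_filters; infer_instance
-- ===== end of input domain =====

-- B replaces A's single loop with per-deployment short-circuit continues by three
-- independent sequential filtering passes (one per active filter); objective: simpler.

-- ===== PORT A =====
def pvPyIn (o : Option String) (l : List String) : Bool :=
  match o with
  | some v => l.contains v
  | none => false

def apply_deployment_filters (deployments : List (List (String × String))) (model_filter : Option (List String)) (sku_filter : Option (List String)) (location_filter : Option (List String)) : List (List (String × String)) :=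
  deployments.foldl (fun filtered_deployments deployment =>
    if (match model_filter with | some (_ :: _) => true | _ => false)
        && !(pvPyIn (PySem.Dict.get? (PySem.Dict.mk deployment) "model") (model_filter.getD [])) then
      filtered_deployments
    else if (match sku_filter with | some (_ :: _) => true | _ => false)
        && !(pvPyIn (PySem.Dict.get? (PySem.Dict.mk deployment) "sku") (sku_filter.getD [])) then
      filtered_deployments
    else if (match location_filter with | some (_ :: _) => true | _ => false)
        && !(pvPyIn (PySem.Dict.get? (PySem.Dict.mk deployment) "location") (location_filter.getD [])) then
      filtered_deployments
    else
      filtered_deployments ++ [deployment]) []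

-- ===== PORT B =====
def pvPyInB (o : Option String) (l : List String) : Bool :=
  (o.map l.contains).getD false

-- Python truthiness of an Optional[List[str]]: non-None and non-empty
def pvTruthy (f : Option (List String)) : Bool :=
  !(f.getD []).isEmpty

def pvPass (key : String) (f : Option (List String)) (result : List (List (String × String))) : List (List (String × String)) :=
  if pvTruthy f then
    result.filter (fun d => pvPyInB (PySem.Dict.get? (PySem.Dict.mk d) key) (f.getD []))
  else result

def apply_deployment_filters_alt (deployments : List (List (String × String))) (model_filter : Option (List String)) (sku_filter : Option (List String)) (location_filter : Option (List String)) : List (List (String × String)) :=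
  pvPass "location" location_filter (pvPass "sku" sku_filter (pvPass "model" model_filter deployments))

-- ===== PRECONDITION & SPEC =====
def Spec_apply_deployment_filters (deployments : List (List (String × String))) (model_filter : Option (List String)) (sku_filter : Option (List String)) (location_filter : Option (List String)) (out : List (List (String × String))) : Prop := out = apply_deployment_filters_alt deployments model_filter sku_filter location_filter
instance (deployments : List (List (String × String))) (model_filter : Option (List String)) (sku_filter : Option (List String)) (location_filter : Option (List String)) (out : List (List (String × String))) : Decidable (Spec_apply_deployment_filters deployments model_filter sku_filter location_filter out) := by unfold Spec_apply_deployment_filters; infer_instance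

-- ===== CLAIM (what is proved, stated in full; the proofs are below) =====
def Claim_equal_apply_deployment_filters : Prop := ∀ (deployments : List (List (String × String))) (model_filter : Option (List String)) (sku_filter : Option (List String)) (location_filter : Option (List String)), Dom_apply_deployment_filters deployments model_filter sku_filter location_filter → Spec_apply_deployment_filters deployments model_filter sku_filter location_filter (apply_deployment_filters deployments model_filter sku_filter location_filter)

-- ===== LEMMAS AND PROOFS =====

-- per-key, per-filter keep test (true when the filter is falsy)
def pvOk (key : String) (f : Option (List String)) (d : List (String × String)) : Bool :=
  if pvTruthy f then pvPyInB (PySem.Dict.get? (PySem.Dict.mk d) key) (f.getD []) else true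

-- the combined per-deployment keep predicate
def pvKeep (mf sf lf : Option (List String)) (d : List (String × String)) : Bool :=
  pvOk "model" mf d && pvOk "sku" sf d && pvOk "location" lf d

theorem pvPass_eq_filter (key : String) (f : Option (List String)) (result : List (List (String × String))) :
    pvPass key f result = result.filter (pvOk key f) := by
  by_cases h : pvTruthy f = true
  · rw [pvPass, if_pos h]
    exact List.filter_congr fun d _ => by rw [pvOk, if_pos h]
  · rw [pvPass, if_neg h]
    exact (List.filter_eq_self.mpr fun d _ => by rw [pvOk, if_neg h]).symm

theorem portB_eq_filter (deployments : List (List (String × String))) (mf sf lf : Option (List String)) :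
    apply_deployment_filters_alt deployments mf sf lf = deployments.filter (pvKeep mf sf lf) := by
  unfold apply_deployment_filters_alt
  rw [pvPass_eq_filter, pvPass_eq_filter, pvPass_eq_filter, List.filter_filter,
    List.filter_filter]
  apply List.filter_congr
  intro d _
  simp [pvKeep, Bool.and_comm, Bool.and_left_comm]

theorem pvPyInB_eq (o : Option String) (l : List String) : pvPyInB o l = pvPyIn o l := by
  cases o <;> rfl

theorem pvStep_eq (mf sf lf : Option (List String)) (acc : List (List (String × String))) (d : List (String × String)) :
    (if (match mf with | some (_ :: _) => true | _ => false)
        && !(pvPyIn (PySem.Dict.get? (PySem.Dict.mk d) "model") (mf.getD [])) then acc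
     else if (match sf with | some (_ :: _) => true | _ => false)
        && !(pvPyIn (PySem.Dict.get? (PySem.Dict.mk d) "sku") (sf.getD [])) then acc
     else if (match lf with | some (_ :: _) => true | _ => false)
        && !(pvPyIn (PySem.Dict.get? (PySem.Dict.mk d) "location") (lf.getD [])) then acc
     else acc ++ [d])
      = acc ++ (if pvKeep mf sf lf d then [d] else []) := by
  rcases mf with _ | ⟨_ | ⟨m, ms⟩⟩ <;> rcases sf with _ | ⟨_ | ⟨s, ss⟩⟩ <;>
    rcases lf with _ | ⟨_ | ⟨l, ls⟩⟩ <;>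
    simp [pvKeep, pvOk, pvPyInB_eq, pvTruthy] <;> split_ifs <;> simp_all [pvPyInB_eq]

theorem portA_eq_filter (deployments : List (List (String × String))) (mf sf lf : Option (List String)) (acc : List (List (String × String))) :
    deployments.foldl (fun filtered_deployments deployment =>
      if (match mf with | some (_ :: _) => true | _ => false)
          && !(pvPyIn (PySem.Dict.get? (PySem.Dict.mk deployment) "model") (mf.getD [])) then
        filtered_deployments
      else if (match sf with | some (_ :: _) => true | _ => false)
          && !(pvPyIn (PySem.Dict.get? (PySem.Dict.mk deployment) "sku") (sf.getD [])) then
        filtered_deployments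
      else if (match lf with | some (_ :: _) => true | _ => false)
          && !(pvPyIn (PySem.Dict.get? (PySem.Dict.mk deployment) "location") (lf.getD [])) then
        filtered_deployments
      else
        filtered_deployments ++ [deployment]) acc
      = acc ++ deployments.filter (pvKeep mf sf lf) := by
  induction deployments generalizing acc with
  | nil => simp
  | cons d ds ih =>
    rw [List.foldl_cons, pvStep_eq, ih, List.filter_cons, List.append_assoc]
    by_cases h : pvKeep mf sf lf d = true <;> simp [h]

-- ===== VERDICT (by name: the statement is the Claim_ definition above) =====
theorem apply_deployment_filters_spec : Claim_equal_apply_deployment_filters := by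
  intro deployments mf sf lf _
  unfold Spec_apply_deployment_filters apply_deployment_filters
  rw [portA_eq_filter, portB_eq_filter]
  simp
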